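-- pv_equiv track=rewrite | github.com/bjarkemoensted/adventofcode | aoc/aoc_2017/solution17.py | fill_buffer
-- ===== SOURCE A (Python) =====
-- def fill_buffer(steps: int, n_elems=2017):
--     buffer = [0]
--     pos = 0
--     for n in range(1, n_elems + 1):
--         pos = (pos + steps) % len(buffer)
--         buffer = buffer[:pos+1] + [n] + buffer[pos+1:]
--         pos += 1
--
--     res = buffer[(pos + 1) % len(buffer)]
--
--     return res
-- ===== SOURCE B (Python) =====
-- def fill_buffer(steps: int, n_elems=2017):
--     # Record only each insertion index, then trace the final slot backwards
--     # through the insertions: O(n) total instead of O(n^2) list slicing.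
--     positions = []
--     pos = 0
--     for n in range(1, n_elems + 1):
--         pos = (pos + steps) % n + 1
--         positions.append(pos)
--     q = (pos + 1) % (len(positions) + 1)
--     for n in range(len(positions), 0, -1):
--         p = positions[n - 1]
--         if q == p:
--             return n
--         if q > p:
--             q -= 1
--     return 0
-- ===== Notes on version B (the rewrite author's own statement) =====
-- stated objective: faster
-- what changed: Instead of rebuilding the buffer by list slicing at every insertion, B records only each insertion index in a forward O(n) pass and then traces the final slot backwards through the insertions to find which value ends up there.
import Mathlib
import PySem

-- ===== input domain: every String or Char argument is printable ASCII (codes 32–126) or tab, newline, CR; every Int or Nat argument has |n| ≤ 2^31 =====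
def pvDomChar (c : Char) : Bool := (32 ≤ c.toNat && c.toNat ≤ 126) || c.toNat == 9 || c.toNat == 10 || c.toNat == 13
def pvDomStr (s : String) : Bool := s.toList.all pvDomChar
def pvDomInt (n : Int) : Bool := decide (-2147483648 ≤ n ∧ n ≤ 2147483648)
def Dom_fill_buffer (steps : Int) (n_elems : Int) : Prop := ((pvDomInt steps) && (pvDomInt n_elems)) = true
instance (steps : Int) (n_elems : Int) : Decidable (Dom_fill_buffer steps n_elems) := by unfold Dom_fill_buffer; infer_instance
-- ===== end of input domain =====

-- B replaces A's quadratic slice-rebuild simulation by one forward pass recording only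
-- the insertion indices plus a backward trace of the final slot (objective: faster).

-- ===== PORT A =====
-- one iteration of A's loop; state = (buffer, pos)
def fbStepA (steps : Int) (st : List Int × Int) (n : Int) : List Int × Int :=
  let pos := PySem.Int.mod (st.2 + steps) ((st.1.length : Int))
  let buffer := PySem.List.slice st.1 none (some (pos + 1)) ++ [n] ++ PySem.List.slice st.1 (some (pos + 1)) none
  (buffer, pos + 1)

-- the final index (pos + 1) % len(buffer) is always in range, so the .getD 0 default is never used
def fill_buffer (steps : Int) (n_elems : Int) : Int :=
  let st := (PySem.List.pyRange 1 (n_elems + 1) 1).foldl (fbStepA steps) ([0], 0)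
  (PySem.List.pyGet? st.1 (PySem.Int.mod (st.2 + 1) ((st.1.length : Int)))).getD 0

-- ===== PORT B =====
-- one iteration of B's forward loop; state = (pos, positions)
def fbStepB (steps : Int) (st : Int × List Int) (n : Int) : Int × List Int :=
  let pos := PySem.Int.mod (st.1 + steps) n + 1
  (pos, st.2 ++ [pos])

-- B's backward for-loop with early return: walks the reversed positions with counter n
def fbBack : List Int → Int → Int → Int
  | [], _, _ => 0
  | p :: rest, n, q =>
    if q = p then n
    else fbBack rest (n - 1) (if q > p then q - 1 else q)

def fill_buffer_alt (steps : Int) (n_elems : Int) : Int :=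
  let st := (PySem.List.pyRange 1 (n_elems + 1) 1).foldl (fbStepB steps) (0, [])
  let q := PySem.Int.mod (st.1 + 1) ((st.2.length : Int) + 1)
  fbBack st.2.reverse (st.2.length : Int) q

-- ===== PRECONDITION & SPEC =====
def Spec_fill_buffer (steps : Int) (n_elems : Int) (out : Int) : Prop := out = fill_buffer_alt steps n_elems
instance (steps : Int) (n_elems : Int) (out : Int) : Decidable (Spec_fill_buffer steps n_elems out) := by unfold Spec_fill_buffer; infer_instance

-- ===== CLAIM (what is proved, stated in full; the proofs are below) =====
def Claim_equal_fill_buffer : Prop := ∀ (steps : Int) (n_elems : Int), Dom_fill_buffer steps n_elems → Spec_fill_buffer steps n_elems (fill_buffer steps n_elems)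

-- ===== LEMMAS AND PROOFS =====

-- indexing after a single insertion at position p
lemma insert_getElem? (l : List Int) (v : Int) (p j : Nat) (hp : p ≤ l.length) :
    (l.take p ++ [v] ++ l.drop p)[j]? =
      if j < p then l[j]? else if j = p then some v else l[j - 1]? := by
  have hl : (l.take p).length = p := by simp [List.length_take, Nat.min_eq_left hp]
  rcases Nat.lt_trichotomy j p with h | h | h
  · simp [List.getElem?_append, hl, h]
  · subst h
    simp [List.getElem?_append, hl]
  · have h1 : ¬ j < p := by omega
    have h2 : j ≠ p := by omega
    simp only [List.getElem?_append, List.length_append, hl, List.length_singleton]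
    rw [if_neg (by omega), if_neg h1, if_neg h2, List.getElem?_drop]
    congr 1
    omega

-- the two loop states after k iterations
def fbA (steps : Int) (k : Nat) : List Int × Int :=
  (PySem.List.pyRange 1 ((k : Int) + 1) 1).foldl (fbStepA steps) ([0], 0)
def fbB (steps : Int) (k : Nat) : Int × List Int :=
  (PySem.List.pyRange 1 ((k : Int) + 1) 1).foldl (fbStepB steps) (0, [])

lemma range_succ' (k : Nat) :
    PySem.List.pyRange 1 (((k + 1 : Nat) : Int) + 1) 1
      = PySem.List.pyRange 1 ((k : Int) + 1) 1 ++ [(k : Int) + 1] := by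
  have h : (1 : Int) ≤ (k : Int) + 1 := by omega
  have := PySem.List.pyRange_one_succ_right h
  push_cast
  exact this

lemma fbA_succ (steps : Int) (k : Nat) :
    fbA steps (k + 1) = fbStepA steps (fbA steps k) ((k : Int) + 1) := by
  unfold fbA
  rw [range_succ', List.foldl_append]
  rfl

lemma fbB_succ (steps : Int) (k : Nat) :
    fbB steps (k + 1) = fbStepB steps (fbB steps k) ((k : Int) + 1) := by
  unfold fbB
  rw [range_succ', List.foldl_append]
  rfl

-- joint invariant: positions coincide, lengths are as expected, and every slot of A's
-- buffer is reconstructed by B's backward trace through the recorded insertion indices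
lemma fb_inv (steps : Int) (k : Nat) :
    (fbA steps k).2 = (fbB steps k).1 ∧ (fbB steps k).2.length = k ∧
    (fbA steps k).1.length = k + 1 ∧ 0 ≤ (fbA steps k).2 ∧ (fbA steps k).2 ≤ (k : Int) ∧
    ∀ j : Nat, j ≤ k →
      ((fbA steps k).1[j]?).getD 0 = fbBack (fbB steps k).2.reverse (k : Int) (j : Int) := by
  induction k with
  | zero =>
      refine ⟨rfl, rfl, rfl, le_refl _, le_refl _, ?_⟩
      intro j hj
      interval_cases j
      simp [fbA, fbB, fbBack, PySem.List.pyRange]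
  | succ k ih =>
      obtain ⟨hpos, hlenB, hlenA, hnn, hub, helem⟩ := ih
      rw [fbA_succ, fbB_succ]
      set buf := (fbA steps k).1 with hbuf
      set pos := (fbA steps k).2 with hposdef
      set ps := (fbB steps k).2 with hps
      set p := PySem.Int.mod (pos + steps) ((k : Int) + 1) with hp
      have hp0 : 0 ≤ p := PySem.Int.mod_nonneg _ (by omega)
      have hp1 : p < (k : Int) + 1 := PySem.Int.mod_lt _ (by omega)
      have hbl : ((buf.length : Int)) = (k : Int) + 1 := by rw [hlenA]; push_cast; ring
      have hpn : (p + 1).toNat ≤ buf.length := by omega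
      have hsA : fbStepA steps (fbA steps k) ((k : Int) + 1)
          = (buf.take (p+1).toNat ++ [(k : Int) + 1] ++ buf.drop (p+1).toNat, p + 1) := by
        show (PySem.List.slice buf none (some (PySem.Int.mod (pos + steps) ((buf.length : Int)) + 1)) ++ _ ++ _, _) = _
        rw [hbl, ← hp, PySem.List.slice_to buf (by omega), PySem.List.slice_from buf (by omega)]
      have hsB : fbStepB steps (fbB steps k) ((k : Int) + 1) = (p + 1, ps ++ [p + 1]) := by
        simp only [fbStepB]
        rw [← hpos, ← hp]
      rw [hsA, hsB]
      refine ⟨rfl, by simp [hlenB], ?_, by omega, by push_cast; omega, ?_⟩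
      · simp
        omega
      · intro j hj
        rw [insert_getElem? buf ((k : Int) + 1) (p+1).toNat j hpn]
        have hrev : (ps ++ [p + 1]).reverse = (p + 1) :: ps.reverse := by simp
        rw [hrev]
        show _ = if ((j : Int)) = p + 1 then ((k:Nat):Int) + 1
          else fbBack ps.reverse (((k:Nat):Int) + 1 - 1) (if ((j : Int)) > p + 1 then (j:Int) - 1 else (j:Int))
        rcases lt_trichotomy ((j : Int)) (p + 1) with h | h | h
        · have hj' : j < (p + 1).toNat := by omega
          have hjk : j ≤ k := by omega
          rw [if_pos hj', if_neg (by omega), if_neg (by omega)]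
          simpa using helem j hjk
        · have hj' : j = (p + 1).toNat := by omega
          rw [if_neg (by omega), if_pos hj', if_pos h]
          simp
        · have h1 : ¬ j < (p + 1).toNat := by omega
          have h2 : j ≠ (p + 1).toNat := by omega
          have hjk : j - 1 ≤ k := by omega
          rw [if_neg h1, if_neg h2, if_neg (by omega), if_pos h]
          have hcast : ((j - 1 : Nat) : Int) = (j : Int) - 1 := by omega
          rw [show ((k:Nat):Int) + 1 - 1 = ((k:Nat):Int) by ring, ← hcast]
          exact helem (j-1) hjk

lemma fb_main (steps n_elems : Int) : fill_buffer steps n_elems = fill_buffer_alt steps n_elems := by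
  by_cases hn : n_elems ≤ 0
  · have hr : PySem.List.pyRange 1 (n_elems + 1) 1 = [] := by
      rw [PySem.List.pyRange_one]
      have h0 : (n_elems + 1 - 1).toNat = 0 := by omega
      simp
      omega
    simp [fill_buffer, fill_buffer_alt, hr, fbBack]
  · obtain ⟨k, hk⟩ : ∃ k : Nat, n_elems = (k : Int) := ⟨n_elems.toNat, by omega⟩
    subst hk
    obtain ⟨hpos, hlenB, hlenA, hnn, hub, helem⟩ := fb_inv steps k
    show (PySem.List.pyGet? (fbA steps k).1
        (PySem.Int.mod ((fbA steps k).2 + 1) (((fbA steps k).1.length : Int)))).getD 0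
      = fbBack (fbB steps k).2.reverse ((fbB steps k).2.length : Int)
        (PySem.Int.mod ((fbB steps k).1 + 1) (((fbB steps k).2.length : Int) + 1))
    have hbl : (((fbA steps k).1.length : Int)) = (k : Int) + 1 := by rw [hlenA]; push_cast; ring
    have hpl : (((fbB steps k).2.length : Int)) = (k : Int) := by rw [hlenB]
    rw [hbl, hpl, ← hpos]
    set q := PySem.Int.mod ((fbA steps k).2 + 1) ((k : Int) + 1) with hq
    have hq0 : 0 ≤ q := PySem.Int.mod_nonneg _ (by omega)
    have hq1 : q < (k : Int) + 1 := PySem.Int.mod_lt _ (by omega)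
    rw [PySem.List.pyGet?_of_nonneg _ hq0]
    have := helem q.toNat (by omega)
    rw [Int.toNat_of_nonneg hq0] at this
    exact this

-- ===== VERDICT (by name: the statement is the Claim_ definition above) =====
theorem fill_buffer_spec : Claim_equal_fill_buffer := by
  intro steps n_elems _
  unfold Spec_fill_buffer
  exact fb_main steps n_elems
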